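-- pv_equiv track=rewrite | github.com/ChiaraLeadbeater/GeneVAE | foetal.smartseq2.py | getCellGroupColors
-- ===== SOURCE A (Python) =====
-- def getCellGroupColors (cell_groups):
--
--     #https://matplotlib.org/tutorials/colors/colors.html
--     # https://blog.xkcd.com/2010/05/03/color-survey-results/
--     #https://xkcd.com/color/rgb/
--
--     grp_list = []
--     for key, grp in cell_groups.items ():
--         grp_list.append (str (grp))
--     grp_list = set (grp_list)
--
--     colors = ['purple', 'green', 'blue', 'pink', 'brown', 'red', 'teal', 'orange', 'yellow',
--             'periwinkle', 'tan', 'ochre', 'grey', 'magenta', 'salmon', 'beige', 'forest green',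
--             'light blue', 'light green', 'light purple', 'peach', 'mustard',
--             'steel', 'ocean']
--
--     print ('Number of groups for coloring=', len (grp_list))
--     print ('Number of colors=', len (colors))
--
--     color_table = {}
--     color_idx = 0
--
--     for key, grp in cell_groups.items ():
--         if str (grp) not in color_table:
--             if color_idx >= len (colors):
--                 color_table [str (grp)] = 'xkcd:' + colors [-1]
--             else:
--                 color_table [str (grp)] = 'xkcd:' + colors [color_idx]
--                 color_idx += 1
--
--     print (color_table)
--
--     return color_table
-- ===== SOURCE B (Python) =====
-- def getCellGroupColors (cell_groups):
--     # Selection-style elimination: repeatedly take the first remaining label and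
--     # strip all its later duplicates from the worklist; no seen-set or counter guard.
--     colors = ['purple', 'green', 'blue', 'pink', 'brown', 'red', 'teal', 'orange', 'yellow',
--             'periwinkle', 'tan', 'ochre', 'grey', 'magenta', 'salmon', 'beige', 'forest green',
--             'light blue', 'light green', 'light purple', 'peach', 'mustard',
--             'steel', 'ocean']
--
--     labels = [str(grp) for grp in cell_groups.values()]
--     print ('Number of groups for coloring=', len (set (labels)))
--     print ('Number of colors=', len (colors))
--
--     color_table = {}
--     i = 0
--     while labels:
--         head = labels[0]
--         labels = [l for l in labels[1:] if l != head]
--         color_table[head] = 'xkcd:' + colors[min(i, len(colors) - 1)]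
--         i += 1
--
--     print (color_table)
--     return color_table
-- ===== Notes on version B (the rewrite author's own statement) =====
-- stated objective: alternative
-- what changed: B replaces A's single pass with a seen-dict membership guard and manual color counter by a selection-style elimination loop: repeatedly take the first remaining label, filter all its duplicates out of the worklist, and assign colors[min(i, len(colors)-1)], so no seen structure or cap branch exists.
import Mathlib
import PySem

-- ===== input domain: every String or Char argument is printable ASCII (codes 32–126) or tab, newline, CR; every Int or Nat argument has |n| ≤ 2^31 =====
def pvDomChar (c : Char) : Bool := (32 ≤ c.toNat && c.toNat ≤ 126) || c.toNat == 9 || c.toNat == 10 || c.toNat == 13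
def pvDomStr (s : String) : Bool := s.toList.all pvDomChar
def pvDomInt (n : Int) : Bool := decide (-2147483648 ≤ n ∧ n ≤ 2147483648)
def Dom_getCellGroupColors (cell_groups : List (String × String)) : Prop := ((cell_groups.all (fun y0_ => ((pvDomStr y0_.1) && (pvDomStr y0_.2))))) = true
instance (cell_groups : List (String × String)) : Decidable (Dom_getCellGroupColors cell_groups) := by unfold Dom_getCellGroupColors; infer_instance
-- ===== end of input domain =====

-- B replaces A's seen-dict membership pass with a counter by a selection-style elimination
-- loop (take the first remaining label, filter its duplicates out of the worklist); an
-- alternative decomposition, not claimed faster (it is O(n*u) where A is one pass).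
-- Prints are side effects and not modelled; the claim is about the returned dict only.

-- the xkcd color list (a literal shared by both ports)
def pvColors : List String := ["purple", "green", "blue", "pink", "brown", "red", "teal", "orange", "yellow",
  "periwinkle", "tan", "ochre", "grey", "magenta", "salmon", "beige", "forest green",
  "light blue", "light green", "light purple", "peach", "mustard",
  "steel", "ocean"]

-- ===== PORT A =====
-- A's loop body: 'if str(grp) not in color_table: …' (named helper for the fold)
def pvStepA (st : PySem.Dict String String × Int) (kv : String × String) :
    PySem.Dict String String × Int :=
  if ¬ (st.1.contains kv.2) then
    if st.2 ≥ (pvColors.length : Int) then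
      (st.1.insert kv.2 ("xkcd:" ++ PySem.List.pyGetD pvColors (-1) ""), st.2)
    else
      (st.1.insert kv.2 ("xkcd:" ++ PySem.List.pyGetD pvColors st.2 ""), st.2 + 1)
  else st

def getCellGroupColors (cell_groups : List (String × String)) : List (String × String) :=
  -- grp_list: A builds a set of the labels (used only for a print; kept as in A)
  let _grp_list : PySem.Set String := PySem.Set.ofList (cell_groups.map (fun kv => kv.2))
  let res := cell_groups.foldl pvStepA (PySem.Dict.empty, 0)
  res.1.items

-- ===== PORT B =====
-- B's while loop: take head, filter its duplicates from the worklist, emit its pair.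
-- (color_table[head] = … always inserts a FRESH key — head was filtered out of the
-- worklist — so the dict insert is exactly an append of the pair.)
def pvLoopB : List String → Int → List (String × String)
  | [], _ => []
  | v :: vs, i =>
      (v, "xkcd:" ++ PySem.List.pyGetD pvColors (min i ((pvColors.length : Int) - 1)) "")
        :: pvLoopB (vs.filter (fun l => l != v)) (i + 1)
  termination_by l _ => l.length
  decreasing_by simpa using Nat.lt_succ_of_le (List.length_filter_le _ _)

def getCellGroupColors_alt (cell_groups : List (String × String)) : List (String × String) :=
  let labels : List String := cell_groups.map (fun kv => kv.2)
  pvLoopB labels 0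

-- ===== PRECONDITION & SPEC =====
def Spec_getCellGroupColors (cell_groups : List (String × String)) (out : List (String × String)) : Prop := out = getCellGroupColors_alt cell_groups
instance (cell_groups : List (String × String)) (out : List (String × String)) : Decidable (Spec_getCellGroupColors cell_groups out) := by unfold Spec_getCellGroupColors; infer_instance

-- ===== CLAIM (what is proved, stated in full; the proofs are below) =====
def Claim_equal_getCellGroupColors : Prop := ∀ (cell_groups : List (String × String)), Dom_getCellGroupColors cell_groups → Spec_getCellGroupColors cell_groups (getCellGroupColors cell_groups)

-- ===== LEMMAS AND PROOFS =====

-- the color string assigned to the idx-th fresh label (shape of A's inner branch)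
def pvAssign (idx : Int) : String :=
  if idx ≥ (pvColors.length : Int) then "xkcd:" ++ PySem.List.pyGetD pvColors (-1) ""
  else "xkcd:" ++ PySem.List.pyGetD pvColors idx ""

-- intermediate specification of A's loop: process labels left to right, skipping seen ones
def pvLoop : List String → List String → Int → List (String × String)
  | [], _, _ => []
  | v :: vs, S, idx =>
    if S.contains v then pvLoop vs S idx
    else (v, pvAssign idx) :: pvLoop vs (S ++ [v]) (idx + 1)

lemma contains_map_fst (l : List (String × String)) (v : String) :
    (l.map Prod.fst).contains v = l.any (fun p => p.1 == v) := by
  rw [Bool.eq_iff_iff]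
  simp only [List.contains_iff_mem, List.mem_map, List.any_eq_true, beq_iff_eq]

-- A caps at colors[-1]: beyond the palette the assigned string no longer depends on idx
lemma pvAssign_cap {a b : Int} (ha : (pvColors.length : Int) ≤ a) (hb : (pvColors.length : Int) ≤ b) :
    pvAssign a = pvAssign b := by
  unfold pvAssign
  rw [if_pos (by omega), if_pos (by omega)]

lemma pvLoop_cap : ∀ (vs S : List String) {a b : Int},
    (pvColors.length : Int) ≤ a → (pvColors.length : Int) ≤ b → pvLoop vs S a = pvLoop vs S b := by
  intro vs
  induction vs with
  | nil => intro S a b _ _; rfl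
  | cons v vs ih =>
    intro S a b ha hb
    simp only [pvLoop]
    split
    · exact ih S ha hb
    · rw [pvAssign_cap ha hb, ih (S ++ [v]) (a := a + 1) (b := b + 1) (by omega) (by omega)]

-- A's fold, started from any dict/counter state, appends exactly pvLoop's output
lemma foldA_eq_pvLoop : ∀ (cg : List (String × String)) (d : PySem.Dict String String) (idx : Int),
    (cg.foldl pvStepA (d, idx)).1.items
    = d.items ++ pvLoop (cg.map (fun kv => kv.2)) (d.items.map Prod.fst) idx := by
  intro cg
  induction cg with
  | nil => intro d idx; simp [pvLoop]
  | cons kv cg ih =>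
    intro d idx
    rw [List.foldl_cons, List.map_cons]
    simp only [pvLoop, contains_map_fst d.items kv.2]
    by_cases hc : d.items.any (fun p => p.1 == kv.2)
    · have hstep : pvStepA (d, idx) kv = (d, idx) := by
        unfold pvStepA
        rw [if_neg]
        simp [PySem.Dict.contains, hc]
      rw [hstep, if_pos hc, ih]
    · have hcd : ¬ (PySem.Dict.contains d kv.2 = true) := by
        simp [PySem.Dict.contains, hc]
      have hins : ∀ (s : String), (d.insert kv.2 s).items = d.items ++ [(kv.2, s)] := by
        intro s
        simp [PySem.Dict.insert, hcd]
      rw [if_neg (by simpa using hc)]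
      by_cases hge : idx ≥ (pvColors.length : Int)
      · have hstep : pvStepA (d, idx) kv
            = (d.insert kv.2 ("xkcd:" ++ PySem.List.pyGetD pvColors (-1) ""), idx) := by
          unfold pvStepA
          rw [if_pos (by simpa using hcd), if_pos hge]
        rw [hstep, ih, hins]
        have hass : pvAssign idx = "xkcd:" ++ PySem.List.pyGetD pvColors (-1) "" := by
          unfold pvAssign; rw [if_pos hge]
        simp only [List.map_append, List.map_cons, List.map_nil, List.append_assoc,
          List.cons_append, List.nil_append, hass]
        rw [pvLoop_cap _ _ (a := idx) (b := idx + 1) (by omega) (by omega)]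
      · have hstep : pvStepA (d, idx) kv
            = (d.insert kv.2 ("xkcd:" ++ PySem.List.pyGetD pvColors idx ""), idx + 1) := by
          unfold pvStepA
          rw [if_pos (by simpa using hcd), if_neg hge]
        rw [hstep, ih, hins]
        have hass : pvAssign idx = "xkcd:" ++ PySem.List.pyGetD pvColors idx "" := by
          unfold pvAssign; rw [if_neg hge]
        simp [hass]

-- B's min-index color equals A's branch for a nonnegative counter
lemma pvAssign_eq_min (idx : Int) (_h : 0 ≤ idx) :
    "xkcd:" ++ PySem.List.pyGetD pvColors (min idx ((pvColors.length : Int) - 1)) ""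
      = pvAssign idx := by
  have hlen : (pvColors.length : Int) = 24 := by decide
  unfold pvAssign
  by_cases hge : idx ≥ (pvColors.length : Int)
  · rw [if_pos hge, min_eq_right (by omega)]
    rw [hlen]
    decide
  · rw [if_neg hge, min_eq_left (by omega)]

-- skipping seen labels up front (A) = eliminating duplicates from the worklist (B)
lemma pvLoop_eq_loopB : ∀ (vs S : List String) (idx : Int), 0 ≤ idx →
    pvLoop vs S idx = pvLoopB (vs.filter (fun l => !(S.contains l))) idx := by
  intro vs
  induction vs with
  | nil => intro S idx _; simp [pvLoop, pvLoopB]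
  | cons v vs ih =>
    intro S idx hidx
    simp only [pvLoop, List.filter_cons]
    by_cases hc : S.contains v
    · rw [if_pos hc, if_neg (by simp only [List.contains_iff_mem] at hc; simp [hc])]
      exact ih S idx hidx
    · rw [if_neg hc, if_pos (by simp only [List.contains_iff_mem] at hc; simp [hc]), pvLoopB]
      rw [pvAssign_eq_min idx hidx]
      congr 1
      have hfilter : (vs.filter (fun l => !(S.contains l))).filter (fun l => l != v)
          = vs.filter (fun l => !((S ++ [v]).contains l)) := by
        rw [List.filter_filter]
        apply List.filter_congr
        intro x _
        by_cases hxv : x = v <;> by_cases hxS : x ∈ S <;> simp [hxv, hxS]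
      rw [hfilter]
      exact ih (S ++ [v]) (idx + 1) (by omega)

-- ===== VERDICT (by name: the statement is the Claim_ definition above) =====
theorem getCellGroupColors_spec : Claim_equal_getCellGroupColors := by
  unfold Claim_equal_getCellGroupColors Spec_getCellGroupColors
  intro cg _
  unfold getCellGroupColors getCellGroupColors_alt
  rw [foldA_eq_pvLoop]
  simp only [PySem.Dict.empty, List.map_nil, List.nil_append]
  rw [pvLoop_eq_loopB _ _ 0 le_rfl]
  congr 1
  simp
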